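-- pv_equiv track=rewrite | github.com/Gauss-p/leetcode | otherContests/PuDong_Q4.py | organizeChessboard
-- ===== SOURCE A (Python) =====
-- from typing import List
--
-- def organizeChessboard(pieces: List[List[int]]) -> int:
--     # 对于所有的棋子，我们有两种排列方式，第一种是将它们全部排列到一行连续且平行于x轴，第二种是将它们全部排列到一列且平行于y轴，在下面我们先考虑如何将它们排列到一行且平行于x轴，因为两种情况其实是等价的
--     # 如果要将它们排列到一行，就需要将它们所有纵坐标变得相等，因此我们将所有点的纵坐标先列出来，那么我们接下来要做的就是将这些数字全部增减至同一个数字，并且总操作次数要最少。因此可以想到中位数，我们只需将这些纵坐标的中位数找出来，那么将所有值变成该数字的总操作数量就最少。因此我们只需排序整个数组，取出最中间的元素，然后求出所有元素和该数字的差值绝对值之和，就可以找到将这些点移动到同一行所需的最小曼哈顿距离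
--     # 接下来，在解决了一行的问题后，剩下的问题就变成了应如何排列才能使·将一行中所有点移动至连续状态的总曼哈顿距离·的值最小。很显然，我们需要在保证先后顺序不变的前提下进行移动，也就是原先横坐标最小的点移动后也应当处在横坐标最小的位置。因此，假设原先所有点的横坐标分别是[x1, x2,..., xn]，并且x1在移动后变成了c，那么移动后的坐标就是[c, c+1,..., c+n-1]，所以可以发现，如果将先后两个列表中的各个值分别减去其对应的索引，原先的横坐标就变成[x1, x2-1,..., xn-n+1]，移动后的横坐标全部都变成了c。这样一来，问题就变成了：如何取c才能使[x1, x2-1,..., xn-n+1]这些值移动到c的曼哈顿距离之和最小？也就等同于上面处理的同一行的问题了。因此我们只需将[x1, x2-1,..., xn-n+1]这些值排序后取中位数，这个中位数就是要求的c，然后分别计算它们与中位数的距离之和，即可得到我们需要的值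
--     # 在具体实现中，我们可以定义一个函数allToOneValue，用来计算怎样才能使一个列表中的所有值移动到同一个位置的曼哈顿距离之和最小，同时定义一个函数allToOneLine，用来计算怎样才能使一个列表中的所有值排成连续的一列的曼哈顿距离之和最小。因此，计算排成同一行且连续的最小曼哈顿距离之和就可以在两个函数中分别传入所有点的纵坐标列表，和它们的横坐标列表，并将返回值相加即可。排成同一列且连续也是同理，只需将横纵坐标列表的传入顺序交换一下即可
--     n = len(pieces)
--     def allToOneValue(lst):
--         lst.sort() # 排序，方便取中位数
--         ans = 0
--         for i in range(n):
--             ans += abs(lst[i]-lst[n//2])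
--         return ans
--
--     def allToOneLine(lst):
--         lst.sort() # 按顺序排列，原先横坐标最小的点最后也应横坐标最小
--         for i in range(n): # 转换列表，将所有值都分别减去它们的索引
--             lst[i] -= i
--         lst.sort() # 排序，方便取中位数
--         ans = 0
--         for i in range(n):
--             ans += abs(lst[i]-lst[n//2])
--         return ans
--
--     arrX, arrY = [], []
--     for x, y in pieces: # 取出所有点的横纵坐标
--         arrX.append(x)
--         arrY.append(y)
--
--     modNum = 1_000_000_007
--     res1 = (allToOneValue(arrX)+allToOneLine(arrY.copy()))%modNum # 排成一列
--     res2 = (allToOneValue(arrY)+allToOneLine(arrX.copy()))%modNum # 排成一行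
--     return min(res1, res2)
-- ===== SOURCE B (Python) =====
-- from typing import List
--
-- def organizeChessboard(pieces: List[List[int]]) -> int:
--     mod = 1_000_000_007
--
--     def cost(vals):
--         # min total distance to a common value: brute-force the best target
--         # among the values themselves (an optimal target is always one of them)
--         return min((sum(abs(x - c) for x in vals) for c in vals), default=0)
--
--     def line_cost(vals):
--         # making values consecutive = moving the index-shifted values to one point
--         return cost([v - i for i, v in enumerate(sorted(vals))])
--
--     xs = [p[0] for p in pieces]
--     ys = [p[1] for p in pieces]
--     return min((cost(xs) + line_cost(ys)) % mod, (cost(ys) + line_cost(xs)) % mod)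
-- ===== Notes on version B (the rewrite author's own statement) =====
-- stated objective: alternative
-- what changed: B removes the median entirely: the minimal common-target cost is found by brute-force minimization over all candidate targets in the list (min over c of sum |x-c|), quadratic and sort-free for the axis cost, with the index shift built by a comprehension over the sorted list instead of A's in-place mutation loop; correct because some list element is always an optimal target.
import Mathlib
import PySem

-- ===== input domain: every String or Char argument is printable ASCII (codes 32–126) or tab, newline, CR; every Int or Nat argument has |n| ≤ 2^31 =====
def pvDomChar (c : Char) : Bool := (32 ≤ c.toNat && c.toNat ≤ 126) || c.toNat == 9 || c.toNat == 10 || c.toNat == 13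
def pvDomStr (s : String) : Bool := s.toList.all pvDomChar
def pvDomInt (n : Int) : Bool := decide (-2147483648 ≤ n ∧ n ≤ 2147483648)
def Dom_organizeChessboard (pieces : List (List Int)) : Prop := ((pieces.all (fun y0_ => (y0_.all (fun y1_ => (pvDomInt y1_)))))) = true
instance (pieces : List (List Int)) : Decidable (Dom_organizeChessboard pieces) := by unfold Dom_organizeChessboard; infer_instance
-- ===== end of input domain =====

-- B drops A's sort+median machinery for the axis cost: it brute-forces the minimal common-target
-- cost as min over candidate targets c in the list of sum |x-c| (an optimal target is always a list
-- element), and builds the index-shifted list by a comprehension instead of A's in-place mutation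
-- loop (return values equal; A mutates only its own local lists). Objective: alternative algorithm.

-- ===== PORT A =====
-- allToOneValue: sort, then sum |lst[i] - lst[n//2]| over range(n)
def pvAllToOneValue (n : Int) (lst0 : List Int) : Int :=
  let lst := PySem.List.sorted lst0 (fun x => x) false
  (PySem.List.pyRange 0 n 1).foldl
    (fun ans i => ans + |PySem.List.pyGetD lst i 0 - PySem.List.pyGetD lst (PySem.Int.floordiv n 2) 0|) 0

-- allToOneLine: sort, subtract index in place, sort again, same median sum
def pvAllToOneLine (n : Int) (lst0 : List Int) : Int :=
  let l1 := PySem.List.sorted lst0 (fun x => x) false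
  let l2 := (PySem.List.pyRange 0 n 1).foldl
    (fun t i => PySem.List.pySetD t i (PySem.List.pyGetD t i 0 - i)) l1
  let lst := PySem.List.sorted l2 (fun x => x) false
  (PySem.List.pyRange 0 n 1).foldl
    (fun ans i => ans + |PySem.List.pyGetD lst i 0 - PySem.List.pyGetD lst (PySem.Int.floordiv n 2) 0|) 0

def organizeChessboard (pieces : List (List Int)) : Int :=
  let n : Int := pieces.length
  -- for x, y in pieces: arrX.append(x); arrY.append(y)   (rows have length 2 under Pre_)
  let arr := pieces.foldl
    (fun (a : List Int × List Int) p =>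
      (a.1 ++ [PySem.List.pyGetD p 0 0], a.2 ++ [PySem.List.pyGetD p 1 0])) ([], [])
  let modNum : Int := 1000000007
  let res1 := PySem.Int.mod (pvAllToOneValue n arr.1 + pvAllToOneLine n arr.2) modNum
  let res2 := PySem.Int.mod (pvAllToOneValue n arr.2 + pvAllToOneLine n arr.1) modNum
  min res1 res2

-- ===== PORT B =====
-- cost(vals) = min over candidate targets c in vals of sum |x - c|, 0 for the empty list
def pvCostB (vals : List Int) : Int :=
  (PySem.List.min? (vals.map (fun c => (vals.map (fun x => |x - c|)).sum)) (fun x => x)).getD 0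

-- line_cost(vals) = cost([v - i for i, v in enumerate(sorted(vals))])
def pvLineCostB (vals : List Int) : Int :=
  pvCostB ((PySem.List.enumerate (PySem.List.sorted vals (fun x => x) false) 0).map (fun p => p.2 - p.1))

def organizeChessboard_alt (pieces : List (List Int)) : Int :=
  let modNum : Int := 1000000007
  let xs := pieces.map (fun p => PySem.List.pyGetD p 0 0)
  let ys := pieces.map (fun p => PySem.List.pyGetD p 1 0)
  let r1 := PySem.Int.mod (pvCostB xs + pvLineCostB ys) modNum
  let r2 := PySem.Int.mod (pvCostB ys + pvLineCostB xs) modNum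
  min r1 r2

-- ===== PRECONDITION & SPEC =====
-- Python A unpacks 'for x, y in pieces': a row whose length is not 2 raises ValueError, so it is outside Pre_.
def Pre_organizeChessboard (pieces : List (List Int)) : Prop := ∀ r ∈ pieces, r.length = 2
instance (pieces : List (List Int)) : Decidable (Pre_organizeChessboard pieces) := by unfold Pre_organizeChessboard; infer_instance
def pvWitness_organizeChessboard : List (List Int) := [[1, 2], [3, 4]]

def Spec_organizeChessboard (pieces : List (List Int)) (out : Int) : Prop := out = organizeChessboard_alt pieces
instance (pieces : List (List Int)) (out : Int) : Decidable (Spec_organizeChessboard pieces out) := by unfold Spec_organizeChessboard; infer_instance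

-- ===== CLAIM (what is proved, stated in full; the proofs are below) =====
def Claim_equal_organizeChessboard : Prop := ∀ (pieces : List (List Int)), Dom_organizeChessboard pieces → Pre_organizeChessboard pieces → Spec_organizeChessboard pieces (organizeChessboard pieces)

-- ===== LEMMAS AND PROOFS =====

-- A's extraction loop builds exactly the two projection maps.
theorem pv_build (pieces : List (List Int)) (u v : List Int) :
    pieces.foldl
      (fun (a : List Int × List Int) p =>
        (a.1 ++ [PySem.List.pyGetD p 0 0], a.2 ++ [PySem.List.pyGetD p 1 0])) (u, v)
    = (u ++ pieces.map (fun p => PySem.List.pyGetD p 0 0),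
       v ++ pieces.map (fun p => PySem.List.pyGetD p 1 0)) := by
  induction pieces generalizing u v with
  | nil => simp
  | cons p ps ih => simp [ih]

-- A's in-place subtract-index loop equals the enumerate comprehension.
theorem pv_subLoop (k : Nat) (l : List Int) (a : Nat) (h : a + k = l.length) :
    (PySem.List.pyRange (a : Int) (l.length : Int) 1).foldl
      (fun t i => PySem.List.pySetD t i (PySem.List.pyGetD t i 0 - i)) l
    = l.take a ++ (PySem.List.enumerate (l.drop a) a).map (fun p => p.2 - p.1) := by
  induction k generalizing l a with
  | zero =>
    have ha : a = l.length := by omega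
    rw [PySem.List.pyRange_one_eq_nil (by exact_mod_cast le_of_eq ha.symm)]
    simp [ha, PySem.List.enumerate_nil]
  | succ k ih =>
    have hal : a < l.length := by omega
    rw [PySem.List.pyRange_one_cons (by exact_mod_cast hal)]
    simp only [List.foldl_cons]
    set v : Int := PySem.List.pyGetD l (a : Int) 0 - a with hv
    have hset : PySem.List.pySetD l (a : Int) v = l.take a ++ v :: l.drop (a + 1) := by
      rw [PySem.List.pySetD_natCast, List.set_eq_take_append_cons_drop, if_pos hal]
    have hlen : (PySem.List.pySetD l (a : Int) v).length = l.length := by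
      rw [PySem.List.pySetD_natCast, List.length_set]
    have hcast : ((a : Int) + 1) = ((a + 1 : Nat) : Int) := by push_cast; ring
    have hlen' : ((l.length : Int)) = (((PySem.List.pySetD l (a : Int) v).length : Int)) := by rw [hlen]
    rw [hcast, hlen']
    rw [ih (PySem.List.pySetD l (a : Int) v) (a + 1) (by rw [hlen]; omega)]
    rw [hset]
    have hta : (l.take a).length = a := by simp [List.length_take]; omega
    rw [List.take_append, List.drop_append]
    simp only [hta]
    have h1 : List.take (a + 1 - a) (v :: l.drop (a + 1)) = [v] := by
      have : a + 1 - a = 1 := by omega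
      simp [this]
    have h2 : List.drop (a + 1 - a) (v :: l.drop (a + 1)) = l.drop (a + 1) := by
      have : a + 1 - a = 1 := by omega
      simp [this]
    have h3 : List.take (a + 1) (l.take a) = l.take a := by
      rw [List.take_take]; congr 1; omega
    have h4 : List.drop (a + 1) (l.take a) = [] := List.drop_eq_nil_of_le (by omega)
    rw [h1, h2, h3, h4, List.nil_append]
    have hdrop : l.drop a = l[a] :: l.drop (a + 1) := List.drop_eq_getElem_cons hal
    rw [hdrop, PySem.List.enumerate_cons]
    have hva : v = l[a] - a := by
      rw [hv, PySem.List.pyGetD_natCast, List.getD_eq_getElem _ _ hal]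
    have hcast2 : ((a : Int) + 1) = ((a + 1 : Nat) : Int) := by push_cast; ring
    rw [List.map_cons, hcast2, ← hva, List.append_assoc, List.singleton_append]

-- list-range sum = Finset.range sum
theorem pv_sum_range {M : Type} [AddCommMonoid M] (n : Nat) (f : Nat → M) :
    ((List.range n).map f).sum = ∑ i ∈ Finset.range n, f i := by
  induction n with
  | zero => simp
  | succ n ih => rw [List.range_succ, Finset.sum_range_succ, List.map_append, List.sum_append, ih]; simp

-- a mapped list sum as a Finset.range sum over getD
theorem pv_map_sum (l : List Int) (g : Int → Int) :
    (l.map g).sum = ∑ i ∈ Finset.range l.length, g (l.getD i 0) := by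
  have : l.map g = (List.range l.length).map (fun i => g (l.getD i 0)) := by
    apply List.ext_getElem
    · simp
    · intro i h1 h2
      simp only [List.getElem_map, List.getElem_range]
      rw [List.getD_eq_getElem _ _ (by simpa using h1)]
  rw [this, pv_sum_range]

-- A's median-deviation loop over a list t, as a Finset sum.
theorem pv_medianSum_eq (t : List Int) :
    (PySem.List.pyRange 0 (t.length : Int) 1).foldl
      (fun ans i => ans + |PySem.List.pyGetD t i 0 - PySem.List.pyGetD t (PySem.Int.floordiv (t.length : Int) 2) 0|) 0
    = ∑ i ∈ Finset.range t.length, |t.getD i 0 - t.getD (t.length / 2) 0| := by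
  have hfd : PySem.Int.floordiv (t.length : Int) 2 = ((t.length / 2 : Nat) : Int) := by
    exact_mod_cast PySem.Int.floordiv_natCast t.length 2
  rw [PySem.List.foldl_add, PySem.List.pyRange_zero_nat, List.map_map, pv_sum_range, zero_add]
  refine Finset.sum_congr rfl (fun i _ => ?_)
  simp only [Function.comp_apply]
  rw [hfd, PySem.List.pyGetD_natCast, PySem.List.pyGetD_natCast]

-- Core identity: for a pointwise-monotone list, the sum of absolute deviations from the lower
-- median equals the paired-endpoint sum.
theorem pv_core (t : List Int)
    (mono : ∀ p q : Nat, p ≤ q → q < t.length → t.getD p 0 ≤ t.getD q 0) :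
    ∑ i ∈ Finset.range t.length, |t.getD i 0 - t.getD (t.length / 2) 0|
    = ∑ i ∈ Finset.range (t.length / 2), (t.getD (t.length - 1 - i) 0 - t.getD i 0) := by
  rcases Nat.eq_zero_or_pos t.length with h0 | hpos
  · simp [h0]
  set N := t.length with hN
  set m := N / 2 with hm
  set g : Nat → Int := fun i => t.getD i 0 with hg
  have hmN : m ≤ N := Nat.div_le_self _ _
  have hmlt : m < N := Nat.div_lt_self hpos (by omega)
  have hsplit : ∑ i ∈ Finset.range N, |g i - g m|
      = (∑ i ∈ Finset.range m, (g m - g i)) + ∑ i ∈ Finset.Ico m N, (g i - g m) := by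
    rw [Finset.range_eq_Ico, ← Finset.sum_Ico_consecutive _ (Nat.zero_le m) hmN,
        ← Finset.range_eq_Ico]
    congr 1
    · refine Finset.sum_congr rfl (fun i hi => ?_)
      have hi' : i < m := Finset.mem_range.mp hi
      have : g i ≤ g m := mono i m (le_of_lt hi') hmlt
      rw [abs_of_nonpos (by omega)]; ring
    · refine Finset.sum_congr rfl (fun i hi => ?_)
      obtain ⟨h1, h2⟩ := Finset.mem_Ico.mp hi
      have : g m ≤ g i := mono m i h1 h2
      rw [abs_of_nonneg (by omega)]
  have hrefl : ∑ i ∈ Finset.range m, g (N - 1 - i) = ∑ i ∈ Finset.Ico (N - m) N, g i := by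
    have e1 : ∑ i ∈ Finset.range m, g (N - 1 - i) = ∑ i ∈ Finset.range m, g (N - m + i) := by
      have := Finset.sum_range_reflect (fun i => g (N - m + i)) m
      rw [← this]
      refine Finset.sum_congr rfl (fun i hi => ?_)
      have hi' : i < m := Finset.mem_range.mp hi
      congr 1; omega
    rw [e1, Finset.sum_Ico_eq_sum_range]
    refine Finset.sum_congr ?_ (fun i _ => rfl)
    congr 1; omega
  have hpair : ∑ i ∈ Finset.range m, (g (N - 1 - i) - g i)
      = (∑ i ∈ Finset.Ico (N - m) N, g i) - ∑ i ∈ Finset.range m, g i := by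
    rw [Finset.sum_sub_distrib, hrefl]
  rw [hsplit, hpair]
  have hgm1 : ∑ i ∈ Finset.range m, (g m - g i)
      = (m : Int) * g m - ∑ i ∈ Finset.range m, g i := by
    rw [Finset.sum_sub_distrib, Finset.sum_const, Finset.card_range, nsmul_eq_mul]
  have hgm2 : ∑ i ∈ Finset.Ico m N, (g i - g m)
      = (∑ i ∈ Finset.Ico m N, g i) - ((N - m : Nat) : Int) * g m := by
    rw [Finset.sum_sub_distrib, Finset.sum_const, Nat.card_Ico, nsmul_eq_mul]
  rw [hgm1, hgm2]
  rcases Nat.even_or_odd N with he | ho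
  · have hNm : N - m = m := by obtain ⟨k, hk⟩ := he; omega
    rw [hNm]
    ring
  · have hNm : N - m = m + 1 := by obtain ⟨k, hk⟩ := ho; omega
    have hIco : ∑ i ∈ Finset.Ico m N, g i = g m + ∑ i ∈ Finset.Ico (m + 1) N, g i := by
      rw [← Finset.sum_Ico_consecutive _ (Nat.le_succ m) (by omega)]
      congr 1
      rw [Finset.sum_Ico_eq_sum_range]
      simp
    rw [hNm, hIco]
    push_cast
    ring

-- sortedness gives pointwise monotonicity in getD form
theorem pv_mono (v : List Int) :
    ∀ p q : Nat, p ≤ q → q < (PySem.List.sorted v (fun x => x) false).length →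
      (PySem.List.sorted v (fun x => x) false).getD p 0 ≤ (PySem.List.sorted v (fun x => x) false).getD q 0 := by
  intro p q hpq hq
  rw [List.getD_eq_getElem _ _ (lt_of_le_of_lt hpq hq), List.getD_eq_getElem _ _ hq]
  exact PySem.List.sorted_id_getElem_mono v hpq hq

-- the paired-endpoint sum lower-bounds the total distance to ANY target c
theorem pv_lower_bound (s : List Int) (c : Int) :
    ∑ i ∈ Finset.range (s.length / 2), (s.getD (s.length - 1 - i) 0 - s.getD i 0)
    ≤ ∑ i ∈ Finset.range s.length, |s.getD i 0 - c| := by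
  set N := s.length with hN
  set m := N / 2 with hm
  set g : Nat → Int := fun i => s.getD i 0 with hg
  have hmN : m ≤ N := Nat.div_le_self _ _
  -- pairwise: the paired sum ≤ Σ_{i<m} (|g i - c| + |g (N-1-i) - c|)
  have hpairwise : ∑ i ∈ Finset.range m, (g (N - 1 - i) - g i)
      ≤ ∑ i ∈ Finset.range m, (|g i - c| + |g (N - 1 - i) - c|) := by
    refine Finset.sum_le_sum (fun i hi => ?_)
    have h1 := le_abs_self (g (N - 1 - i) - c)
    have h2 := neg_abs_le (g i - c)
    linarith
  -- the paired targets sum ≤ full sum (nonneg terms; disjoint index sets inside range N)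
  have hsplit : ∑ i ∈ Finset.range m, (|g i - c| + |g (N - 1 - i) - c|)
      ≤ ∑ i ∈ Finset.range N, |g i - c| := by
    rw [Finset.sum_add_distrib]
    have hrefl : ∑ i ∈ Finset.range m, |g (N - 1 - i) - c| = ∑ i ∈ Finset.Ico (N - m) N, |g i - c| := by
      have e1 : ∑ i ∈ Finset.range m, |g (N - 1 - i) - c|
          = ∑ i ∈ Finset.range m, |g (N - m + i) - c| := by
        have := Finset.sum_range_reflect (fun i => |g (N - m + i) - c|) m
        rw [← this]
        refine Finset.sum_congr rfl (fun i hi => ?_)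
        have hi' : i < m := Finset.mem_range.mp hi
        have harg : N - m + (m - 1 - i) = N - 1 - i := by omega
        rw [harg]
      rw [e1, Finset.sum_Ico_eq_sum_range]
      refine Finset.sum_congr ?_ (fun i _ => rfl)
      congr 1; omega
    rw [hrefl]
    have hIcoSub : Finset.Ico (N - m) N ⊆ Finset.Ico m N := by
      intro j hj
      obtain ⟨hj1, hj2⟩ := Finset.mem_Ico.mp hj
      exact Finset.mem_Ico.mpr ⟨by omega, hj2⟩
    have hle2 : ∑ i ∈ Finset.Ico (N - m) N, |g i - c| ≤ ∑ i ∈ Finset.Ico m N, |g i - c| :=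
      Finset.sum_le_sum_of_subset_of_nonneg hIcoSub (fun i _ _ => abs_nonneg _)
    have hsum : ∑ i ∈ Finset.range N, |g i - c|
        = (∑ i ∈ Finset.range m, |g i - c|) + ∑ i ∈ Finset.Ico m N, |g i - c| := by
      rw [Finset.range_eq_Ico, ← Finset.sum_Ico_consecutive _ (Nat.zero_le m) hmN,
          ← Finset.range_eq_Ico]
    omega
  calc ∑ i ∈ Finset.range m, (g (N - 1 - i) - g i)
      ≤ ∑ i ∈ Finset.range m, (|g i - c| + |g (N - 1 - i) - c|) := hpairwise
    _ ≤ ∑ i ∈ Finset.range N, |g i - c| := hsplit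

-- value of min? on a list containing a value that lower-bounds every element
theorem pv_min_val (l : List Int) (a : Int) (ha : a ∈ l) (hle : ∀ x ∈ l, a ≤ x) :
    (PySem.List.min? l (fun x => x)).getD 0 = a := by
  cases hm : PySem.List.min? l (fun x => x) with
  | none =>
    rw [PySem.List.min?_eq_none_iff] at hm
    subst hm; cases ha
  | some mval =>
    have hmem : mval ∈ l := PySem.List.min?_mem hm
    have h1 : mval ≤ a := PySem.List.min?_isMin hm a ha
    have h2 : a ≤ mval := hle mval hmem
    simp [le_antisymm h1 h2]

-- MAIN: A's sort + median-deviation pipeline on v equals B's brute-force minimum on v.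
theorem pv_main (v : List Int) :
    (PySem.List.pyRange 0 (v.length : Int) 1).foldl
      (fun ans i => ans + |PySem.List.pyGetD (PySem.List.sorted v (fun x => x) false) i 0
        - PySem.List.pyGetD (PySem.List.sorted v (fun x => x) false) (PySem.Int.floordiv (v.length : Int) 2) 0|) 0
    = pvCostB v := by
  set s := PySem.List.sorted v (fun x => x) false with hs
  have hl : s.length = v.length := PySem.List.length_sorted v _ _
  set P : Int := ∑ i ∈ Finset.range (s.length / 2), (s.getD (s.length - 1 - i) 0 - s.getD i 0) with hP
  -- A's side equals P
  have hA : (PySem.List.pyRange 0 (v.length : Int) 1).foldl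
      (fun ans i => ans + |PySem.List.pyGetD s i 0
        - PySem.List.pyGetD s (PySem.Int.floordiv (v.length : Int) 2) 0|) 0 = P := by
    rw [← hl, pv_medianSum_eq, pv_core _ (pv_mono v)]
  rw [hA]
  -- B's side: each candidate's total is ≥ P, and the candidate s[m] attains P
  rcases List.eq_nil_or_concat v with hnil | ⟨l0, x0, hcat⟩
  · subst hnil
    decide
  · have hvne : v ≠ [] := by rw [hcat]; simp
    have hpos : 0 < v.length := List.length_pos_iff.mpr hvne
    have hspos : 0 < s.length := by omega
    set m := s.length / 2 with hm
    have hmlt : m < s.length := Nat.div_lt_self hspos (by omega)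
    set mv : Int := s.getD m 0 with hmv
    -- total distance of candidate c, over v, equals the Finset sum over s
    have htot : ∀ c : Int, (v.map (fun x => |x - c|)).sum = ∑ i ∈ Finset.range s.length, |s.getD i 0 - c| := by
      intro c
      have hperm : (s.map (fun x => |x - c|)).Perm (v.map (fun x => |x - c|)) :=
        (PySem.List.sorted_perm v (fun x => x) false).map _
      rw [← hperm.sum_eq, pv_map_sum]
    unfold pvCostB
    symm
    apply pv_min_val
    · -- the value P is attained by candidate mv ∈ v
      have hmvmem : mv ∈ v := by
        rw [← PySem.List.mem_sorted v (fun x => x) false]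
        rw [hmv, List.getD_eq_getElem _ _ hmlt]
        exact List.getElem_mem hmlt
      have : (v.map (fun x => |x - mv|)).sum = P := by
        rw [htot mv, hP, hmv, hm]
        exact pv_core s (pv_mono v)
      exact this ▸ List.mem_map_of_mem hmvmem
    · intro x hx
      obtain ⟨c, _, rfl⟩ := List.mem_map.mp hx
      rw [htot c, hP]
      exact pv_lower_bound s c

-- allToOneValue v = pvCostB v
theorem pv_value_eq (v : List Int) :
    pvAllToOneValue (v.length : Int) v = pvCostB v := by
  simp only [pvAllToOneValue]
  exact pv_main v

-- allToOneLine v = pvLineCostB v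
theorem pv_line_eq (v : List Int) :
    pvAllToOneLine (v.length : Int) v = pvLineCostB v := by
  simp only [pvAllToOneLine, pvLineCostB]
  set l1 := PySem.List.sorted v (fun x => x) false with hl1
  have hl1len : l1.length = v.length := PySem.List.length_sorted v _ _
  have hloop : (PySem.List.pyRange 0 (v.length : Int) 1).foldl
      (fun t i => PySem.List.pySetD t i (PySem.List.pyGetD t i 0 - i)) l1
      = (PySem.List.enumerate l1 0).map (fun p => p.2 - p.1) := by
    have := pv_subLoop l1.length l1 0 (by omega)
    simpa [hl1len] using this
  rw [hloop]
  set w := (PySem.List.enumerate l1 0).map (fun p => (p.2 : Int) - p.1) with hw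
  have hwlen : w.length = v.length := by
    simp [hw, PySem.List.length_enumerate, hl1len]
  rw [← hwlen]
  exact pv_main w

-- ===== VERDICT (by name: the statement is the Claim_ definition above) =====
theorem organizeChessboard_spec : Claim_equal_organizeChessboard := by
  intro pieces _ _
  simp only [Spec_organizeChessboard, organizeChessboard, organizeChessboard_alt]
  rw [pv_build pieces [] []]
  simp only [List.nil_append]
  set X := pieces.map (fun p => PySem.List.pyGetD p 0 0) with hX
  set Y := pieces.map (fun p => PySem.List.pyGetD p 1 0) with hY
  have hXlen : (pieces.length : Int) = (X.length : Int) := by simp [hX]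
  have hYlen : (pieces.length : Int) = (Y.length : Int) := by simp [hY]
  rw [show pvAllToOneValue (pieces.length : Int) X = pvAllToOneValue (X.length : Int) X by rw [hXlen],
      show pvAllToOneValue (pieces.length : Int) Y = pvAllToOneValue (Y.length : Int) Y by rw [hYlen],
      show pvAllToOneLine (pieces.length : Int) X = pvAllToOneLine (X.length : Int) X by rw [hXlen],
      show pvAllToOneLine (pieces.length : Int) Y = pvAllToOneLine (Y.length : Int) Y by rw [hYlen],
      pv_value_eq, pv_value_eq, pv_line_eq, pv_line_eq]
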